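-- pv_equiv track=rewrite | github.com/fenwickxie/data_analysis | d_a/analysis_service.py | _handle_car_price
-- ===== SOURCE A (Python) =====
-- def _handle_car_price(value):
--     """
--     处理 SCHEDULE-CAR-PRICE
--     格式: {'fee': [{'stationId': '...', 'sendTime': '...', ...}, ...]}
--     """
--     if not isinstance(value, dict):
--         return []
--
--     data_list = value.get("fee")
--     if not data_list or not isinstance(data_list, list):
--         return []
--
--     # 按场站分组
--     from collections import defaultdict
--
--     station_groups = defaultdict(list)
--
--     for item in data_list:
--         if isinstance(item, dict):
--             station_id = item.get("stationId")
--             if station_id: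
--                 station_groups[station_id].append(item)
--
--     # 对每个场站的数据按 sendTime 排序
--     station_data_list = []
--     for station_id, items in station_groups.items():
--         sorted_items = sorted(items, key=lambda x: x.get("sendTime", ""))
--         station_data_list.append((station_id, sorted_items))
--
--     return station_data_list
-- ===== SOURCE B (Python) =====
-- def _handle_car_price(value):
--     if not isinstance(value, dict):
--         return []
--
--     data_list = value.get("fee")
--     if not data_list or not isinstance(data_list, list):
--         return []
--
--     # keep only valid items, remember station order of first appearance,
--     # then build each station's group by filtering and sorting once per station
--     valid = [it for it in data_list if isinstance(it, dict) and it.get("stationId")]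
--     ids = list(dict.fromkeys(it.get("stationId") for it in valid))
--     return [
--         (sid,
--          sorted((it for it in valid if it.get("stationId") == sid),
--                 key=lambda x: x.get("sendTime", "")))
--         for sid in ids
--     ]
-- ===== Notes on version B (the rewrite author's own statement) =====
-- stated objective: alternative
-- what changed: A groups items in one pass with a defaultdict and then sorts each group's list; B filters the valid items once, deduplicates stationIds in first-appearance order, and builds each station's group by a per-station filter over the valid items, sorted by sendTime. Pre_ only excludes association lists that bind a looked-up dict key ('fee', or an item's 'stationId'/'sendTime') twice, which do not encode a Python dict (dict keys are unique), so first-vs-last lookup there is equally defensible either way.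
import Mathlib
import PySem

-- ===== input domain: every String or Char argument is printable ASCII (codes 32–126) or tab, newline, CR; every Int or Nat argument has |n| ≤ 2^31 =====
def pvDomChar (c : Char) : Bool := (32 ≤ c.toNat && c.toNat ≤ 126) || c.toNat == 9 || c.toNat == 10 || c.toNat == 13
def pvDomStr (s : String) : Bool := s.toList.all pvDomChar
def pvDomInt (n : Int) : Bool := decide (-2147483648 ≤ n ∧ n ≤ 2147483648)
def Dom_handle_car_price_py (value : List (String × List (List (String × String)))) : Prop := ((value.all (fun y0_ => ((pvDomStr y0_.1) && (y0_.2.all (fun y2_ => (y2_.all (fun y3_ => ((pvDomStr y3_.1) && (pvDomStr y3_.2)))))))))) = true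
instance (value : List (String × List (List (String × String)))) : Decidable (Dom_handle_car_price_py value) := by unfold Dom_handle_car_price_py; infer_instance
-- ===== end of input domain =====

-- B replaces A's defaultdict grouping loop by: filter the valid items once, take the
-- station ids in first-appearance order (ordered dedup), and build each group by a
-- per-station filter, sorting it by sendTime — an alternative decomposition, not faster.

-- ===== PORT A =====
def handle_car_price_py (value : List (String × List (List (String × String)))) : List (String × (List (List (String × String)))) :=
  match (PySem.Dict.mk value).get? "fee" with
  | none => []
  | some data_list =>
    if data_list = [] then []
    else
      -- 按场站分组: defaultdict(list), append per item with truthy stationId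
      let station_groups :=
        data_list.foldl (fun g item =>
          match (PySem.Dict.mk item).get? "stationId" with
          | none => g
          | some station_id =>
            if station_id == "" then g
            else g.modify station_id [] (fun items => items ++ [item]))
          PySem.Dict.empty
      -- sort each station's items by sendTime, append (sid, sorted) pairs
      station_groups.items.foldl (fun acc p =>
        acc ++ [(p.1, PySem.List.sorted p.2 (fun x => (PySem.Dict.mk x).getD "sendTime" "") false)]) []

-- ===== PORT B =====
-- it.get("stationId") tested for truthiness / compared to a nonempty sid: the "" default merges None and ""
def pvSid (it : List (String × String)) : String := (PySem.Dict.mk it).getD "stationId" ""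
def pvSend (it : List (String × String)) : String := (PySem.Dict.mk it).getD "sendTime" ""

def handle_car_price_py_alt (value : List (String × List (List (String × String)))) : List (String × (List (List (String × String)))) :=
  match (PySem.Dict.mk value).get? "fee" with
  | none => []
  | some data_list =>
    if data_list = [] then []
    else
      let valid := data_list.filter (fun it => !(pvSid it == ""))
      (PySem.List.dedup (valid.map pvSid)).map (fun sid =>
        (sid, PySem.List.sorted (valid.filter (fun it => pvSid it == sid)) pvSend false))

-- ===== PRECONDITION & SPEC =====
-- Pre_ excludes association lists that bind a looked-up dict key twice ("fee" in value, or
-- "stationId"/"sendTime" inside an item): such lists do not encode a Python dict (whose keys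
-- are unique), so on them first-match and last-match lookup are equally defensible readings.
def Pre_handle_car_price_py (value : List (String × List (List (String × String)))) : Prop :=
  (value.map Prod.fst).count "fee" ≤ 1 ∧
  ∀ p ∈ value, ∀ it ∈ p.2,
    (it.map Prod.fst).count "stationId" ≤ 1 ∧ (it.map Prod.fst).count "sendTime" ≤ 1
instance (value : List (String × List (List (String × String)))) : Decidable (Pre_handle_car_price_py value) := by unfold Pre_handle_car_price_py; infer_instance

def pvWitness_handle_car_price_py : (List (String × List (List (String × String)))) :=
  [("fee", [[("stationId", "s1"), ("sendTime", "2")], [("stationId", "s1"), ("sendTime", "1")]])]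

def Spec_handle_car_price_py (value : List (String × List (List (String × String)))) (out : List (String × (List (List (String × String))))) : Prop := out = handle_car_price_py_alt value
instance (value : List (String × List (List (String × String)))) (out : List (String × (List (List (String × String))))) : Decidable (Spec_handle_car_price_py value out) := by unfold Spec_handle_car_price_py; infer_instance

-- ===== CLAIM (what is proved, stated in full; the proofs are below) =====
def Claim_equal_handle_car_price_py : Prop := ∀ (value : List (String × List (List (String × String)))), Dom_handle_car_price_py value → Pre_handle_car_price_py value → Spec_handle_car_price_py value (handle_car_price_py value)

-- ===== LEMMAS AND PROOFS =====

-- A's per-item step (skip on missing/empty stationId, else append to the group) in guarded form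
theorem pv_stepA_eq (g : PySem.Dict String (List (List (String × String)))) (it : List (String × String)) :
    (match (PySem.Dict.mk it).get? "stationId" with
      | none => g
      | some station_id =>
        if station_id == "" then g
        else g.modify station_id [] (fun items => items ++ [it]))
    = if !(pvSid it == "") then g.modify (pvSid it) [] (fun items => items ++ [it]) else g := by
  unfold pvSid PySem.Dict.getD
  cases h : (PySem.Dict.mk it).get? "stationId" with
  | none => simp
  | some s => by_cases hs : s = "" <;> simp [hs]

-- ===== VERDICT (by name: the statement is the Claim_ definition above) =====
theorem handle_car_price_py_spec : Claim_equal_handle_car_price_py := by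
  intro value _ _
  unfold Spec_handle_car_price_py handle_car_price_py handle_car_price_py_alt
  cases hfee : (PySem.Dict.mk value).get? "fee" with
  | none => rfl
  | some data_list =>
    by_cases hnil : data_list = []
    · simp [hnil]
    · simp only [if_neg hnil]
      rw [PySem.List.foldl_append_singleton_eq_map]
      have hstep : data_list.foldl (fun g item =>
          match (PySem.Dict.mk item).get? "stationId" with
          | none => g
          | some station_id =>
            if station_id == "" then g
            else g.modify station_id [] (fun items => items ++ [item]))
          PySem.Dict.empty
        = (data_list.filter (fun it => !(pvSid it == ""))).foldl
            (fun g it => g.modify (pvSid it) [] (fun items => items ++ [it])) PySem.Dict.empty := by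
        have h1 := PySem.List.foldl_congr_mem
            (l := data_list) (init := (PySem.Dict.empty : PySem.Dict String (List (List (String × String)))))
            (g := fun g it =>
              if !(pvSid it == "") then g.modify (pvSid it) [] (fun items => items ++ [it]) else g)
            (h := fun acc x _ => pv_stepA_eq acc x)
        rw [h1]
        exact PySem.List.foldl_if_eq_foldl_filter _ _ _ _
      rw [hstep]
      set valid := data_list.filter (fun it => !(pvSid it == "")) with hvalid
      have hpair : valid.foldl (fun g it => g.modify (pvSid it) [] (fun items => items ++ [it])) PySem.Dict.empty
          = (valid.map (fun it => (pvSid it, it))).foldl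
              (fun g p => g.modify p.1 [] (fun items => items ++ [p.2])) PySem.Dict.empty := by
        rw [List.foldl_map]
      have hkeys : (valid.foldl (fun g it => g.modify (pvSid it) [] (fun items => items ++ [it]))
            PySem.Dict.empty).keys = PySem.List.dedup (valid.map pvSid) := by
        rw [PySem.Dict.keys_foldl_modify_key]
        simp [PySem.Dict.empty, PySem.Set.update, PySem.Set.ofList_eq_foldl]
      have hnd : (valid.foldl (fun g it => g.modify (pvSid it) [] (fun items => items ++ [it]))
            PySem.Dict.empty).keys.Nodup := by
        rw [hkeys]; simp [PySem.Set.nodup_ofList]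
      rw [PySem.Dict.items_eq_map_keys _ hnd []]
      rw [hkeys, List.map_map]
      apply List.map_congr_left
      intro k _
      simp only [Function.comp]
      congr 1
      rw [hpair, PySem.Dict.getD_foldl_modify_append]
      unfold pvSend
      simp [List.filter_map, List.map_map, Function.comp_def,
        PySem.Dict.empty, PySem.Dict.getD, PySem.Dict.get?]
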